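-- pv_equiv track=rewrite | github.com/dislovelhl/acgs2 | scripts/optimize_test_files.py | _group_classes_by_functionality
-- ===== SOURCE A (Python) =====
-- from typing import Dict, List
--
-- def _group_classes_by_functionality(classes: List[str]) -> Dict[str, List[str]]:
--     """Group test classes by functionality."""
--     groups = {
--         "lifecycle": [],
--         "messaging": [],
--         "routing": [],
--         "security": [],
--         "metrics": [],
--         "integration": [],
--         "edge_cases": [],
--         "other": [],
--     }
--
--     for cls in classes:
--         cls_lower = cls.lower()
--         if any(word in cls_lower for word in ["lifecycle", "start", "stop", "init"]):
--             groups["lifecycle"].append(cls)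
--         elif any(word in cls_lower for word in ["message", "send", "receive"]):
--             groups["messaging"].append(cls)
--         elif any(word in cls_lower for word in ["route", "kafka", "queue"]):
--             groups["routing"].append(cls)
--         elif any(word in cls_lower for word in ["security", "auth", "permission"]):
--             groups["security"].append(cls)
--         elif any(word in cls_lower for word in ["metric", "monitor", "telemetry"]):
--             groups["metrics"].append(cls)
--         elif any(word in cls_lower for word in ["integration", "e2e"]):
--             groups["integration"].append(cls)
--         elif any(word in cls_lower for word in ["edge", "error", "exception"]):
--             groups["edge_cases"].append(cls)
--         else:
--             groups["other"].append(cls)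
--
--     # Remove empty groups
--     return {k: v for k, v in groups.items() if v}
-- ===== SOURCE B (Python) =====
-- RULES = [
--     ("lifecycle", ["lifecycle", "start", "stop", "init"]),
--     ("messaging", ["message", "send", "receive"]),
--     ("routing", ["route", "kafka", "queue"]),
--     ("security", ["security", "auth", "permission"]),
--     ("metrics", ["metric", "monitor", "telemetry"]),
--     ("integration", ["integration", "e2e"]),
--     ("edge_cases", ["edge", "error", "exception"]),
-- ]
--
--
-- def _build(rules, remaining):
--     """Rule-major recursive sieve: peel off the classes matching the first rule,
--     recurse on the rest with the remaining rules; leftovers become 'other'."""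
--     if not rules:
--         return {"other": remaining} if remaining else {}
--     name, words = rules[0]
--     matched = [c for c in remaining if any(w in c.lower() for w in words)]
--     rest = [c for c in remaining if not any(w in c.lower() for w in words)]
--     tail = _build(rules[1:], rest)
--     return {name: matched, **tail} if matched else tail
--
--
-- def _group_classes_by_functionality(classes):
--     return _build(RULES, list(classes))
-- ===== Notes on version B (the rewrite author's own statement) =====
-- stated objective: alternative
-- what changed: Replaces A's class-major single pass (each class classified by an if/elif chain and appended into a pre-built eight-key dict, then empty groups dropped) by a rule-major recursive sieve: for each keyword rule in order, partition the remaining classes into that rule's bucket and a shrinking remainder, recurse on the remainder, leftovers become 'other'; no per-class category labels and no empty buckets are ever created.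
import Mathlib
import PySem

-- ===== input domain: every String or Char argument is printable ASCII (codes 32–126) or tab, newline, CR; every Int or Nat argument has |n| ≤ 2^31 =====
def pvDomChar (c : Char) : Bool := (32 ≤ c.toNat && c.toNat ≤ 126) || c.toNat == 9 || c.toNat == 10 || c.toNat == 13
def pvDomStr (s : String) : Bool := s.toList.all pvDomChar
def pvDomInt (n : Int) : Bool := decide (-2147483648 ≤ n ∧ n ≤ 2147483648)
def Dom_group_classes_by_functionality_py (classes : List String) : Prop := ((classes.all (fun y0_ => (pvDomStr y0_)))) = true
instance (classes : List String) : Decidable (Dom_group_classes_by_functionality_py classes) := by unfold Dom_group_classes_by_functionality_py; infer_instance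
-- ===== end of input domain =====

-- B replaces A's class-major pass (if/elif chain appending into a pre-built eight-key
-- dict, then dropping empty groups) by a rule-major recursive sieve over a shrinking
-- remainder; objective: alternative.

-- ===== PORT A =====
def group_classes_by_functionality_py (classes : List String) : List (String × List String) :=
  let groups : PySem.Dict String (List String) := PySem.Dict.ofList
    [("lifecycle", []), ("messaging", []), ("routing", []), ("security", []),
     ("metrics", []), ("integration", []), ("edge_cases", []), ("other", [])]
  let groups := classes.foldl (fun groups cls =>
    let cls_lower := PySem.Str.lower cls
    if ["lifecycle", "start", "stop", "init"].any (fun w => PySem.Str.isIn w cls_lower) then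
      groups.modify "lifecycle" [] (fun v => v ++ [cls])
    else if ["message", "send", "receive"].any (fun w => PySem.Str.isIn w cls_lower) then
      groups.modify "messaging" [] (fun v => v ++ [cls])
    else if ["route", "kafka", "queue"].any (fun w => PySem.Str.isIn w cls_lower) then
      groups.modify "routing" [] (fun v => v ++ [cls])
    else if ["security", "auth", "permission"].any (fun w => PySem.Str.isIn w cls_lower) then
      groups.modify "security" [] (fun v => v ++ [cls])
    else if ["metric", "monitor", "telemetry"].any (fun w => PySem.Str.isIn w cls_lower) then
      groups.modify "metrics" [] (fun v => v ++ [cls])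
    else if ["integration", "e2e"].any (fun w => PySem.Str.isIn w cls_lower) then
      groups.modify "integration" [] (fun v => v ++ [cls])
    else if ["edge", "error", "exception"].any (fun w => PySem.Str.isIn w cls_lower) then
      groups.modify "edge_cases" [] (fun v => v ++ [cls])
    else
      groups.modify "other" [] (fun v => v ++ [cls])) groups
  groups.items.filter (fun kv => !kv.2.isEmpty)

-- ===== PORT B =====
def pvRules : List (String × List String) :=
  [("lifecycle", ["lifecycle", "start", "stop", "init"]),
   ("messaging", ["message", "send", "receive"]),
   ("routing", ["route", "kafka", "queue"]),
   ("security", ["security", "auth", "permission"]),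
   ("metrics", ["metric", "monitor", "telemetry"]),
   ("integration", ["integration", "e2e"]),
   ("edge_cases", ["edge", "error", "exception"])]

-- Source B's `_build`: `{name: matched, **tail}` is `(name, matched) :: tail` because the
-- name of the current rule never occurs in the recursively built tail (rule names are
-- distinct and none is "other").
def pvBuild : List (String × List String) → List String → List (String × List String)
  | [], remaining => if remaining.isEmpty then [] else [("other", remaining)]
  | (name, words) :: rs, remaining =>
      let matched := remaining.filter (fun c => words.any (fun w => PySem.Str.isIn w (PySem.Str.lower c)))
      let rest := remaining.filter (fun c => !(words.any (fun w => PySem.Str.isIn w (PySem.Str.lower c))))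
      let tail := pvBuild rs rest
      if matched.isEmpty then tail else (name, matched) :: tail

def group_classes_by_functionality_py_alt (classes : List String) : List (String × List String) :=
  pvBuild pvRules classes

-- ===== PRECONDITION & SPEC =====
def Spec_group_classes_by_functionality_py (classes : List String) (out : List (String × List String)) : Prop := out = group_classes_by_functionality_py_alt classes
instance (classes : List String) (out : List (String × List String)) : Decidable (Spec_group_classes_by_functionality_py classes out) := by unfold Spec_group_classes_by_functionality_py; infer_instance

-- ===== CLAIM =====
def Claim_equal_group_classes_by_functionality_py : Prop := ∀ (classes : List String), Dom_group_classes_by_functionality_py classes → Spec_group_classes_by_functionality_py classes (group_classes_by_functionality_py classes)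

-- ===== LEMMAS AND PROOFS =====
def pvNames : List String :=
  ["lifecycle", "messaging", "routing", "security", "metrics", "integration", "edge_cases", "other"]

def pvInit : PySem.Dict String (List String) := PySem.Dict.ofList
  [("lifecycle", []), ("messaging", []), ("routing", []), ("security", []),
   ("metrics", []), ("integration", []), ("edge_cases", []), ("other", [])]

def pvFirstMatch : List (String × List String) → String → String
  | [], _ => "other"
  | (name, words) :: rest, low =>
      if words.any (fun w => PySem.Str.isIn w low) then name else pvFirstMatch rest low

def pvCategory (cls : String) : String := pvFirstMatch pvRules (PySem.Str.lower cls)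

-- A's if/elif chain appends cls to exactly the bucket named by pvCategory cls
lemma pvStep (d : PySem.Dict String (List String)) (cls : String) :
    (let cls_lower := PySem.Str.lower cls
     if ["lifecycle", "start", "stop", "init"].any (fun w => PySem.Str.isIn w cls_lower) then
       d.modify "lifecycle" [] (fun v => v ++ [cls])
     else if ["message", "send", "receive"].any (fun w => PySem.Str.isIn w cls_lower) then
       d.modify "messaging" [] (fun v => v ++ [cls])
     else if ["route", "kafka", "queue"].any (fun w => PySem.Str.isIn w cls_lower) then
       d.modify "routing" [] (fun v => v ++ [cls])
     else if ["security", "auth", "permission"].any (fun w => PySem.Str.isIn w cls_lower) then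
       d.modify "security" [] (fun v => v ++ [cls])
     else if ["metric", "monitor", "telemetry"].any (fun w => PySem.Str.isIn w cls_lower) then
       d.modify "metrics" [] (fun v => v ++ [cls])
     else if ["integration", "e2e"].any (fun w => PySem.Str.isIn w cls_lower) then
       d.modify "integration" [] (fun v => v ++ [cls])
     else if ["edge", "error", "exception"].any (fun w => PySem.Str.isIn w cls_lower) then
       d.modify "edge_cases" [] (fun v => v ++ [cls])
     else
       d.modify "other" [] (fun v => v ++ [cls])) =
    d.modify (pvCategory cls) [] (fun v => v ++ [cls]) := by
  simp only [pvCategory, pvRules, pvFirstMatch]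
  split_ifs <;> rfl

lemma pvFirstMatch_mem (rules : List (String × List String)) (low : String) :
    pvFirstMatch rules low ∈ rules.map (·.1) ++ ["other"] := by
  induction rules with
  | nil => simp [pvFirstMatch]
  | cons r rs ih =>
      obtain ⟨name, words⟩ := r
      simp only [pvFirstMatch]
      split_ifs
      · simp
      · simp only [List.map_cons, List.cons_append, List.mem_cons]
        exact Or.inr ih

lemma pvCategory_mem (cls : String) : pvCategory cls ∈ pvNames := by
  have h := pvFirstMatch_mem pvRules (PySem.Str.lower cls)
  simpa [pvRules, pvNames, pvCategory] using h

lemma pvFinish (bucket : String → List String) (ns : List String) :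
    (ns.map (fun n => (n, bucket n))).filter (fun kv => !kv.2.isEmpty)
      = ns.filterMap (fun name =>
          let b := bucket name; if b.isEmpty then none else some (name, b)) := by
  induction ns with
  | nil => rfl
  | cons n t ih =>
      simp only [List.map_cons, List.filter_cons, List.filterMap_cons]
      cases h : (bucket n).isEmpty <;> simp only [ih] <;> simp

-- the sieve computes, for each rule name in order, exactly the first-match bucket
lemma pvBuild_eq (rules : List (String × List String)) (rem : List String)
    (hn : (rules.map (·.1)).Nodup) (ho : "other" ∉ rules.map (·.1)) :
    pvBuild rules rem = (rules.map (·.1) ++ ["other"]).filterMap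
      (fun n =>
        let b := rem.filter (fun c => pvFirstMatch rules (PySem.Str.lower c) == n)
        if b.isEmpty then none else some (n, b)) := by
  induction rules generalizing rem with
  | nil =>
      simp only [pvBuild, pvFirstMatch, List.map_nil, List.nil_append,
        List.filterMap_cons, List.filterMap_nil]
      have hfil : rem.filter (fun _ => ("other" : String) == "other") = rem := by
        simp
      rw [hfil]
      cases rem.isEmpty <;> simp
  | cons r rs ih =>
      obtain ⟨name, words⟩ := r
      have hname_rs : name ∉ rs.map (·.1) := (List.nodup_cons.1 (by simpa using hn)).1
      have hname_other : name ≠ "other" := by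
        intro h; exact ho (by simp [← h])
      have ho' : "other" ∉ rs.map (·.1) := fun h => ho (by simp [h])
      have hn' : (rs.map (·.1)).Nodup := (List.nodup_cons.1 (by simpa using hn)).2
      simp only [pvBuild, List.map_cons, List.cons_append, List.filterMap_cons]
      -- head bucket equals `matched`
      have hhead : rem.filter (fun c => pvFirstMatch ((name, words) :: rs) (PySem.Str.lower c) == name)
          = rem.filter (fun c => words.any (fun w => PySem.Str.isIn w (PySem.Str.lower c))) := by
        apply List.filter_congr
        intro c _
        simp only [pvFirstMatch]
        cases hm : words.any (fun w => PySem.Str.isIn w (PySem.Str.lower c))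
        · simp only [Bool.false_eq_true, if_false]
          have := pvFirstMatch_mem rs (PySem.Str.lower c)
          have hne : pvFirstMatch rs (PySem.Str.lower c) ≠ name := by
            intro h
            rw [h] at this
            rcases List.mem_append.1 this with h1 | h1
            · exact hname_rs h1
            · exact hname_other (by simpa using h1)
          simp [hne]
        · simp
      -- tail buckets over rem equal buckets over rest
      have htail : ((rs.map (·.1)) ++ ["other"]).filterMap
            (fun n =>
              let b := rem.filter (fun c => pvFirstMatch ((name, words) :: rs) (PySem.Str.lower c) == n)
              if b.isEmpty then none else some (n, b))
          = ((rs.map (·.1)) ++ ["other"]).filterMap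
            (fun n =>
              let b := (rem.filter (fun c => !(words.any (fun w => PySem.Str.isIn w (PySem.Str.lower c))))).filter
                    (fun c => pvFirstMatch rs (PySem.Str.lower c) == n)
              if b.isEmpty then none else some (n, b)) := by
        apply List.filterMap_congr
        intro n hmemn
        have hname_n : name ≠ n := by
          intro h; subst h
          rcases List.mem_append.1 hmemn with h1 | h1
          · exact hname_rs h1
          · exact hname_other (by simpa using h1)
        have hfeq : rem.filter (fun c => pvFirstMatch ((name, words) :: rs) (PySem.Str.lower c) == n)
            = (rem.filter (fun c => !(words.any (fun w => PySem.Str.isIn w (PySem.Str.lower c))))).filter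
                (fun c => pvFirstMatch rs (PySem.Str.lower c) == n) := by
          rw [List.filter_filter]
          apply List.filter_congr
          intro c _
          simp only [pvFirstMatch]
          cases hm : words.any (fun w => PySem.Str.isIn w (PySem.Str.lower c))
          · simp
          · simp [hname_n]
        simp only [hfeq]
      rw [htail, hhead, ← ih _ hn' ho']
      cases (rem.filter (fun c => words.any (fun w => PySem.Str.isIn w (PySem.Str.lower c)))).isEmpty <;> simp

-- ===== VERDICT =====
theorem group_classes_by_functionality_py_spec : Claim_equal_group_classes_by_functionality_py := by
  intro classes _
  unfold Spec_group_classes_by_functionality_py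
  unfold group_classes_by_functionality_py group_classes_by_functionality_py_alt
  have hstep : (fun (d : PySem.Dict String (List String)) (cls : String) =>
      let cls_lower := PySem.Str.lower cls
      if ["lifecycle", "start", "stop", "init"].any (fun w => PySem.Str.isIn w cls_lower) then
        d.modify "lifecycle" [] (fun v => v ++ [cls])
      else if ["message", "send", "receive"].any (fun w => PySem.Str.isIn w cls_lower) then
        d.modify "messaging" [] (fun v => v ++ [cls])
      else if ["route", "kafka", "queue"].any (fun w => PySem.Str.isIn w cls_lower) then
        d.modify "routing" [] (fun v => v ++ [cls])
      else if ["security", "auth", "permission"].any (fun w => PySem.Str.isIn w cls_lower) then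
        d.modify "security" [] (fun v => v ++ [cls])
      else if ["metric", "monitor", "telemetry"].any (fun w => PySem.Str.isIn w cls_lower) then
        d.modify "metrics" [] (fun v => v ++ [cls])
      else if ["integration", "e2e"].any (fun w => PySem.Str.isIn w cls_lower) then
        d.modify "integration" [] (fun v => v ++ [cls])
      else if ["edge", "error", "exception"].any (fun w => PySem.Str.isIn w cls_lower) then
        d.modify "edge_cases" [] (fun v => v ++ [cls])
      else
        d.modify "other" [] (fun v => v ++ [cls])) =
      (fun d cls => d.modify (pvCategory cls) [] (fun v => v ++ [cls])) := by
    funext d cls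
    exact pvStep d cls
  rw [hstep]
  show (List.filter (fun kv => !kv.2.isEmpty)
    (classes.foldl (fun d cls => d.modify (pvCategory cls) [] fun v => v ++ [cls]) pvInit).items) = _
  set F := classes.foldl (fun d cls => d.modify (pvCategory cls) [] (fun v => v ++ [cls])) pvInit with hF
  have hpair : F = (classes.map (fun c => (pvCategory c, c))).foldl
      (fun d p => d.modify p.1 [] (fun v => v ++ [p.2])) pvInit := by
    rw [List.foldl_map]
  have hkeys : F.keys = pvNames := by
    rw [hpair, PySem.Dict.keys_foldl_modify_key]
    have h1 : (pvInit : PySem.Dict String (List String)).keys = pvNames := by decide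
    rw [h1, List.map_map]
    rw [PySem.Set.update_eq_append_filter]
    have h2 : (PySem.Set.ofList (classes.map (Prod.fst ∘ fun c => (pvCategory c, c)))).filter
        (fun y => !(PySem.Set.contains pvNames y)) = [] := by
      rw [List.filter_eq_nil_iff]
      intro a ha
      have : a ∈ classes.map (Prod.fst ∘ fun c => (pvCategory c, c)) := by
        exact (PySem.Set.mem_ofList _ _).1 ha
      rcases List.mem_map.1 this with ⟨c, _, rfl⟩
      simpa using pvCategory_mem c
    rw [h2, List.append_nil]
  have hnodup : F.keys.Nodup := by rw [hkeys]; decide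
  have hgetD : ∀ n ∈ pvNames, F.getD n [] = classes.filter (fun c => pvCategory c == n) := by
    intro n hn
    rw [hpair, PySem.Dict.getD_foldl_modify_append]
    have h0 : (pvInit : PySem.Dict String (List String)).getD n [] = [] := by
      fin_cases hn <;> decide
    rw [h0, List.nil_append, List.filter_map, List.map_map]
    have : ((fun p => p.2) ∘ fun c => (pvCategory c, c) : String → String) = id := rfl
    rw [this, List.map_id]
    rfl
  have hitems : F.items = pvNames.map (fun n => (n, classes.filter (fun c => pvCategory c == n))) := by
    rw [PySem.Dict.items_eq_map_keys F hnodup [], hkeys]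
    exact List.map_congr_left (fun n hn => by rw [hgetD n hn])
  rw [hitems, pvFinish]
  rw [pvBuild_eq pvRules classes (by decide) (by decide)]
  have hns : pvRules.map (·.1) ++ ["other"] = pvNames := by decide
  rw [hns]
  rfl
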